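-- pv_equiv track=rewrite | github.com/MFry/pyAlgoDataStructures | hacker_rank/WoC_24/xor-matrix.py | get_xor_matrix
-- ===== SOURCE A (Python) =====
-- from operator import xor
--
-- def get_xor_matrix(row, total_columns):
--     matrix = [row]
--     for i in range(total_columns):
--         temp = []
--         for j in range(len(row)):
--             left = j
--             right = j + 1
--             if right == len(row):
--                 right = 0
--             test = matrix[-1]
--             temp.append(xor(matrix[-1][left], matrix[-1][right]))
--         matrix.append(temp)
--     return matrix
-- ===== SOURCE B (Python) =====
-- def get_xor_matrix(row, total_columns):
--     # Row k is computed from row (k - 2**s) XOR'd with itself rotated by 2**s,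
--     # where 2**s is the top power of two in k  ((1+x)^(2**s) = 1 + x^(2**s) over GF(2)).
--     n = len(row)
--     out = [list(row)]
--     for k in range(1, max(total_columns, 0) + 1):
--         p = 1 << (k.bit_length() - 1)
--         prev = out[k - p]
--         out.append([prev[i] ^ prev[(i + p) % n] for i in range(n)])
--     return out
-- ===== Notes on version B (the rewrite author's own statement) =====
-- stated objective: alternative
-- what changed: B computes row k not from the immediately previous row by adjacent cyclic XOR but from the earlier row k - 2**s (2**s the top power of two in k, via bit_length) XOR'd with itself rotated by 2**s, using the GF(2) identity (1+x)^(2**s) = 1 + x^(2**s).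
import Mathlib
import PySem

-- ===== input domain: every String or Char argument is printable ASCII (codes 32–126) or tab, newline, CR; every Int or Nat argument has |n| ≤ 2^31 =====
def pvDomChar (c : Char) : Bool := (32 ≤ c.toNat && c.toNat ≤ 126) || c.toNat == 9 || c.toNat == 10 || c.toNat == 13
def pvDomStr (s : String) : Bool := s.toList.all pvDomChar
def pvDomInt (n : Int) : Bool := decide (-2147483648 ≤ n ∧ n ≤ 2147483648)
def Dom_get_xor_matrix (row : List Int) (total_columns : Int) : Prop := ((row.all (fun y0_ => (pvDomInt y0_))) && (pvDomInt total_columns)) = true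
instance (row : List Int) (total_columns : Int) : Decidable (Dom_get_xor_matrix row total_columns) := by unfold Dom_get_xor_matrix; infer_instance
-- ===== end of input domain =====

-- B computes row k from the much earlier row k - 2^s (2^s = top power of two in k) XOR'd with
-- itself rotated by 2^s, instead of XOR-ing adjacent entries of the previous row (alternative
-- decomposition; return-value equality only: A aliases matrix[0] to the caller's list, B copies it).

-- ===== PORT A =====
def get_xor_matrix (row : List Int) (total_columns : Int) : List (List Int) :=
  (PySem.List.pyRange 0 total_columns 1).foldl
    (fun matrix _i =>
      matrix ++
        [(PySem.List.pyRange 0 (row.length : Int) 1).foldl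
          (fun temp j =>
            let left : Int := j
            let right : Int := if j + 1 = (row.length : Int) then 0 else j + 1
            let test := PySem.List.pyGetD matrix (-1) []
            temp ++ [PySem.Int.bxor (PySem.List.pyGetD test left 0) (PySem.List.pyGetD test right 0)])
          []])
    [row]

-- ===== PORT B =====
def get_xor_matrix_alt (row : List Int) (total_columns : Int) : List (List Int) :=
  let n := row.length
  (PySem.List.pyRange 1 (max total_columns 0 + 1) 1).foldl
    (fun out k =>
      let p : Int := (1 : Int) <<< (PySem.Int.bitLength k - 1)
      let prev := PySem.List.pyGetD out (k - p) []
      out ++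
        [(PySem.List.pyRange 0 (n : Int) 1).map
          (fun i => PySem.Int.bxor (PySem.List.pyGetD prev i 0)
            (PySem.List.pyGetD prev (PySem.Int.mod (i + p) (n : Int)) 0))])
    [row]

-- ===== PRECONDITION & SPEC =====
def Spec_get_xor_matrix (row : List Int) (total_columns : Int) (out : List (List Int)) : Prop := out = get_xor_matrix_alt row total_columns
instance (row : List Int) (total_columns : Int) (out : List (List Int)) : Decidable (Spec_get_xor_matrix row total_columns out) := by unfold Spec_get_xor_matrix; infer_instance

-- ===== CLAIM (what is proved, stated in full; the proofs are below) =====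
def Claim_equal_get_xor_matrix : Prop := ∀ (row : List Int) (total_columns : Int), Dom_get_xor_matrix row total_columns → Spec_get_xor_matrix row total_columns (get_xor_matrix row total_columns)

-- ===== LEMMAS AND PROOFS =====

-- xor algebra for PySem.Int.bxor
theorem bxor_eq_xor (a b : Int) : PySem.Int.bxor a b = Int.xor a b := by
  unfold PySem.Int.bxor
  rcases a with m | m <;> rcases b with n | n <;> simp [Int.xor, Int.toNat] <;> omega

theorem bxor_assoc (a b c : Int) :
    PySem.Int.bxor (PySem.Int.bxor a b) c = PySem.Int.bxor a (PySem.Int.bxor b c) := by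
  simp only [bxor_eq_xor]
  rcases a with m | m <;> rcases b with n | n <;> rcases c with k | k <;>
    simp [Int.xor, Nat.xor_assoc]

theorem bxor_zero_left (a : Int) : PySem.Int.bxor 0 a = a := by
  rw [PySem.Int.bxor_comm]; exact PySem.Int.bxor_zero a

theorem bxor_left_comm (a b c : Int) :
    PySem.Int.bxor a (PySem.Int.bxor b c) = PySem.Int.bxor b (PySem.Int.bxor a c) := by
  rw [← bxor_assoc, PySem.Int.bxor_comm a b, bxor_assoc]

theorem bxor_cancel_left (a x : Int) : PySem.Int.bxor a (PySem.Int.bxor a x) = x := by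
  rw [← bxor_assoc, PySem.Int.bxor_self, bxor_zero_left]

-- the "XOR with self rotated by p" operator on rows of length n
def Tp (n p : Nat) (v : List Int) : List Int :=
  (List.range n).map (fun i => PySem.Int.bxor (v.getD i 0) (v.getD ((i + p) % n) 0))

theorem Tp_length (n p : Nat) (v : List Int) : (Tp n p v).length = n := by simp [Tp]

theorem Tp_getD (n p : Nat) (v : List Int) (i : Nat) (hi : i < n) :
    (Tp n p v).getD i 0 = PySem.Int.bxor (v.getD i 0) (v.getD ((i + p) % n) 0) := by
  rw [List.getD_eq_getElem _ _ (by simpa [Tp_length] using hi)]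
  simp [Tp]

theorem Tp_comp (n p : Nat) (v : List Int) : Tp n p (Tp n p v) = Tp n (p + p) v := by
  apply List.ext_getElem (by simp [Tp_length])
  intro i h1 h2
  have hi : i < n := by simpa [Tp_length] using h1
  have hn : 0 < n := by omega
  rw [show (Tp n p (Tp n p v))[i] = (Tp n p (Tp n p v)).getD i 0 from
      (List.getD_eq_getElem _ _ h1).symm,
    show (Tp n (p + p) v)[i] = (Tp n (p + p) v).getD i 0 from
      (List.getD_eq_getElem _ _ h2).symm,
    Tp_getD n p (Tp n p v) i hi, Tp_getD n (p + p) v i hi,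
    Tp_getD n p v i hi, Tp_getD n p v ((i + p) % n) (Nat.mod_lt _ hn),
    Nat.mod_add_mod, show i + p + p = i + (p + p) by ring]
  simp [bxor_assoc, bxor_left_comm, bxor_cancel_left]

theorem T1_pow2 (n s : Nat) (v : List Int) : (Tp n 1)^[2 ^ s] v = Tp n (2 ^ s) v := by
  induction s generalizing v with
  | zero => simp
  | succ s ih =>
      rw [show 2 ^ (s + 1) = 2 ^ s + 2 ^ s by ring, Function.iterate_add_apply, ih, ih, Tp_comp]

-- the canonical value of both programs: iterated adjacent-XOR rows
def canon (row : List Int) (s : Nat) : List (List Int) :=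
  (List.range (s + 1)).map (fun k => (Tp row.length 1)^[k] row)

theorem canon_getD (row : List Int) (s k : Nat) (hk : k < s + 1) :
    (canon row s).getD k [] = (Tp row.length 1)^[k] row := by
  rw [List.getD_eq_getElem _ _ (by simpa [canon] using hk)]
  simp only [canon, List.getElem_map, List.getElem_range]

theorem canon_last (row : List Int) (s : Nat) :
    PySem.List.pyGetD (canon row s) (-1) [] = (Tp row.length 1)^[s] row := by
  rw [show canon row s
      = (List.range s).map (fun k => (Tp row.length 1)^[k] row) ++ [(Tp row.length 1)^[s] row] by
    simp [canon, List.range_succ]]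
  exact PySem.List.pyGetD_neg_one_append_singleton _ _ _

theorem canon_succ (row : List Int) (s : Nat) :
    canon row (s + 1) = canon row s ++ [(Tp row.length 1)^[s + 1] row] := by
  simp [canon, List.range_succ]

-- A's inner loop is Tp n 1 applied to the last row
theorem inner_eq (v : List Int) (n : Nat) :
    (PySem.List.pyRange 0 (n : Int) 1).foldl
      (fun temp j =>
        temp ++ [PySem.Int.bxor (PySem.List.pyGetD v j 0)
          (PySem.List.pyGetD v (if j + 1 = (n : Int) then 0 else j + 1) 0)]) []
    = Tp n 1 v := by
  rw [PySem.List.pyRange_one, List.foldl_map, show ((n : Int) - 0).toNat = n by omega]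
  rw [PySem.List.foldl_append_singleton_eq_map, List.nil_append]
  apply List.map_congr_left
  intro j hj
  have hjn : j < n := List.mem_range.mp hj
  simp only [zero_add]
  by_cases h : j + 1 = n
  · rw [if_pos (show (j : Int) + 1 = (n : Int) by omega),
      show (j + 1) % n = 0 from by rw [h, Nat.mod_self],
      PySem.List.pyGetD_natCast, PySem.List.pyGetD_zero]
  · rw [if_neg (show ¬((j : Int) + 1 = (n : Int)) by omega),
      show ((j : Int) + 1) = ((j + 1 : Nat) : Int) by push_cast; ring,
      PySem.List.pyGetD_natCast, PySem.List.pyGetD_natCast,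
      show (j + 1) % n = j + 1 from Nat.mod_eq_of_lt (by omega)]

-- A's step as a function of the matrix so far (exactly the port's loop body)
def SA (row : List Int) (matrix : List (List Int)) : List (List Int) :=
  matrix ++
    [(PySem.List.pyRange 0 (row.length : Int) 1).foldl
      (fun temp j =>
        let left : Int := j
        let right : Int := if j + 1 = (row.length : Int) then 0 else j + 1
        let test := PySem.List.pyGetD matrix (-1) []
        temp ++ [PySem.Int.bxor (PySem.List.pyGetD test left 0) (PySem.List.pyGetD test right 0)])
      []]

theorem SA_canon (row : List Int) (s : Nat) : SA row (canon row s) = canon row (s + 1) := by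
  unfold SA
  simp only [canon_last]
  rw [inner_eq ((Tp row.length 1)^[s] row) row.length, canon_succ,
    ← Function.iterate_succ_apply' (Tp row.length 1) s row]

theorem SA_iter (row : List Int) (s : Nat) : (SA row)^[s] [row] = canon row s := by
  induction s with
  | zero => simp [canon]
  | succ s ih => rw [Function.iterate_succ_apply', ih, SA_canon]

theorem A_eq_canon (row : List Int) (t : Int) : get_xor_matrix row t = canon row t.toNat := by
  have h : get_xor_matrix row t
      = List.foldl (fun m _ => SA row m) [row] (PySem.List.pyRange 0 t 1) := rfl
  rw [h, List.foldl_const, PySem.List.length_pyRange_one, show (t - 0).toNat = t.toNat by omega,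
    SA_iter]

-- B's step on the list of rows built so far (exactly the port's loop body)
def SB (row : List Int) (out : List (List Int)) (k : Int) : List (List Int) :=
  let p : Int := (1 : Int) <<< (PySem.Int.bitLength k - 1)
  let prev := PySem.List.pyGetD out (k - p) []
  out ++
    [(PySem.List.pyRange 0 (row.length : Int) 1).map
      (fun i => PySem.Int.bxor (PySem.List.pyGetD prev i 0)
        (PySem.List.pyGetD prev (PySem.Int.mod (i + p) (row.length : Int)) 0))]

theorem one_shiftLeft_eq (t : Nat) : (1 : Int) <<< t = ((2 ^ t : Nat) : Int) := by
  rw [Int.shiftLeft_eq]; push_cast; ring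

-- B's inner comprehension is Tp n p applied to the fetched row
theorem innerB_eq (prev : List Int) (n P : Nat) :
    (PySem.List.pyRange 0 (n : Int) 1).map
      (fun i => PySem.Int.bxor (PySem.List.pyGetD prev i 0)
        (PySem.List.pyGetD prev (PySem.Int.mod (i + (P : Int)) (n : Int)) 0))
    = Tp n P prev := by
  rw [PySem.List.pyRange_one, List.map_map, show ((n : Int) - 0).toNat = n by omega]
  apply List.map_congr_left
  intro j _
  show PySem.Int.bxor (PySem.List.pyGetD prev ((0 : Int) + j) 0)
      (PySem.List.pyGetD prev (PySem.Int.mod ((0 : Int) + j + P) (n : Int)) 0) = _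
  rw [show ((0 : Int) + j) = ((j : Nat) : Int) by omega,
    show ((j : Int) + (P : Int)) = ((j + P : Nat) : Int) by push_cast; ring,
    PySem.Int.mod_natCast, PySem.List.pyGetD_natCast, PySem.List.pyGetD_natCast]

theorem SB_canon (row : List Int) (m : Nat) :
    SB row (canon row m) ((m : Int) + 1) = canon row (m + 1) := by
  have hrfl : SB row (canon row m) ((m : Int) + 1)
      = canon row m ++
        [(PySem.List.pyRange 0 (row.length : Int) 1).map
          (fun i => PySem.Int.bxor
            (PySem.List.pyGetD (PySem.List.pyGetD (canon row m)
              (((m : Int) + 1) - ((1 : Int) <<< (PySem.Int.bitLength ((m : Int) + 1) - 1))) []) i 0)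
            (PySem.List.pyGetD (PySem.List.pyGetD (canon row m)
              (((m : Int) + 1) - ((1 : Int) <<< (PySem.Int.bitLength ((m : Int) + 1) - 1))) [])
              (PySem.Int.mod (i + ((1 : Int) <<< (PySem.Int.bitLength ((m : Int) + 1) - 1)))
                (row.length : Int)) 0))] := rfl
  have hble := PySem.Int.two_pow_bitLength_le ((m : Int) + 1) (by positivity)
  have hnatAbs : ((m : Int) + 1).natAbs = m + 1 := by omega
  rw [hnatAbs] at hble
  rw [hrfl]
  generalize hs : PySem.Int.bitLength ((m : Int) + 1) - 1 = s₀ at hble ⊢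
  have hPle : 2 ^ s₀ ≤ m + 1 := hble
  have hPpos : 0 < 2 ^ s₀ := Nat.two_pow_pos s₀
  have hidx : ((m : Int) + 1) - ((2 ^ s₀ : Nat) : Int) = ((m + 1 - 2 ^ s₀ : Nat) : Int) := by
    rw [Nat.cast_sub hPle]; push_cast; ring
  rw [one_shiftLeft_eq, hidx, PySem.List.pyGetD_natCast,
    show (canon row m).getD (m + 1 - 2 ^ s₀) [] = (Tp row.length 1)^[m + 1 - 2 ^ s₀] row from
      canon_getD row m _ (by omega),
    innerB_eq, ← T1_pow2, ← Function.iterate_add_apply,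
    show 2 ^ s₀ + (m + 1 - 2 ^ s₀) = m + 1 by omega, canon_succ]

theorem B_loop (row : List Int) (m : Nat) :
    (PySem.List.pyRange 1 ((m : Int) + 1) 1).foldl (fun out k => SB row out k) [row]
      = canon row m := by
  induction m with
  | zero => rw [PySem.List.pyRange_one_eq_nil (by omega)]; simp [canon]
  | succ m ih =>
      rw [show ((m + 1 : Nat) : Int) + 1 = ((m : Int) + 1) + 1 by push_cast; ring,
        PySem.List.pyRange_one_succ_right (by omega), List.foldl_append]
      simp only [List.foldl_cons, List.foldl_nil, ih]
      exact SB_canon row m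

theorem B_eq_canon (row : List Int) (t : Int) : get_xor_matrix_alt row t = canon row t.toNat := by
  have h : get_xor_matrix_alt row t
      = (PySem.List.pyRange 1 (max t 0 + 1) 1).foldl (fun out k => SB row out k) [row] := rfl
  rw [h, show max t 0 = ((t.toNat : Nat) : Int) from (Int.ofNat_toNat t).symm, B_loop]

-- ===== VERDICT (by name: the statement is the Claim_ definition above) =====
theorem get_xor_matrix_spec : Claim_equal_get_xor_matrix := by
  intro row t _
  unfold Spec_get_xor_matrix
  rw [A_eq_canon, B_eq_canon]
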